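-- pv_equiv track=rewrite | github.com/hacetheworld/competitive-programming-practices | problems/codeforce/bike-rent.py | Solution
-- ===== SOURCE A (Python) =====
-- def Solution(boys_money, bike_rent, schoolBoys, bikes, sharedBudget):
--     # Solution
--     l = 0
--     r = bikes
--     prefixSum = [0]
--     for bm in boys_money:
--         prefixSum.append(prefixSum[-1]+bm)
--     totalSum = sharedBudget+sum(boys_money)
--     ans = [0, 0]
--     while l <= r:
--         mid = (l+r)//2
--         res = canBuy(bike_rent, mid, totalSum-prefixSum[mid])
--         if res[0]:
--             l = mid+1
--             ans = (mid, abs(sharedBudget-res[1]))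
--         else:
--             r = mid-1
--     return ans
--
-- def canBuy(bike_rent, mid, totalSum):
--     tempSum = 0
--     for i in range(mid):
--         tempSum += bike_rent[i]
--         if tempSum > totalSum:
--             return [False, 0]
--     return [True, tempSum]
-- ===== SOURCE B (Python) =====
-- def Solution(boys_money, bike_rent, schoolBoys, bikes, sharedBudget):
--     # prefix sums of boys' money
--     prefB = [0]
--     sB = 0
--     for x in boys_money:
--         sB += x
--         prefB.append(sB)
--     # prefix sums of rents and running maximum of the non-empty prefix sums
--     prefR = [0]
--     maxR = [0]  # maxR[0] is a placeholder, never consulted (mid == 0 is handled first)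
--     s = 0
--     m = None
--     for x in bike_rent:
--         s += x
--         m = s if m is None else (m if m >= s else s)
--         prefR.append(s)
--         maxR.append(m)
--     total = sharedBudget + sB
--     ans = (0, 0)
--     l, r = 0, bikes
--     while l <= r:
--         mid = (l + r) // 2
--         if mid == 0 or maxR[mid] <= total - prefB[mid]:
--             ans = (mid, abs(sharedBudget - prefR[mid]))
--             l = mid + 1
--         else:
--             r = mid - 1
--     return ans
-- ===== Notes on version B (the rewrite author's own statement) =====
-- stated objective: alternative
-- what changed: B precomputes prefix sums of boys_money and prefix sums plus running prefix-maxima of bike_rent once, so each binary-search probe is a single table comparison instead of A's canBuy loop that re-sums bike_rent[:mid] with an early exit on every probe.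
-- outside the precondition, e.g. on Solution([0, 100], [20], 0, 2, 10): A returns (1, 10), B raises IndexError; on Solution([0, 0], [100], 0, 2, 0): A returns (0, 0), B returns (0, 0)
import Mathlib
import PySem

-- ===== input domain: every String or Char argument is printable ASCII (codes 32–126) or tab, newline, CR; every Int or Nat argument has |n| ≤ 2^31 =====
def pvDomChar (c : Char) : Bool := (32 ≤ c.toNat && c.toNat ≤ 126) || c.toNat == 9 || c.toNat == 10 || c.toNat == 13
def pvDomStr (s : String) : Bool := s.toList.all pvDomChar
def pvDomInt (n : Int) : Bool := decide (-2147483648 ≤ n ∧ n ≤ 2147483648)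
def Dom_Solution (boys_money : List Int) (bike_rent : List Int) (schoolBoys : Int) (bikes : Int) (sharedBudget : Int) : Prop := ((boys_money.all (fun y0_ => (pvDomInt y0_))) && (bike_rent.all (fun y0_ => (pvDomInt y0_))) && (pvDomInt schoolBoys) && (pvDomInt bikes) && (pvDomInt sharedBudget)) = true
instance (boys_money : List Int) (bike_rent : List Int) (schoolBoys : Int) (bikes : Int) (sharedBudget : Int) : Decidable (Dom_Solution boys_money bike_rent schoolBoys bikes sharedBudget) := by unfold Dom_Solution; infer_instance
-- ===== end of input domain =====

-- B: an alternative algorithm — precomputed prefix-sum / prefix-maximum tables replace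
-- A's per-probe canBuy rescans; equivalence is proved on Pre_ (bikes within both list
-- lengths, where the Python A returns without IndexError).

-- ===== PORT A =====
def canBuyGo (bike_rent : List Int) (totalSum : Int) : List Int → Int → Bool × Int
  | [], tempSum => (true, tempSum)
  | i :: rest, tempSum =>
    match PySem.List.pyGet? bike_rent i with
    | none => (false, 0)  -- Python raises IndexError here; unreachable under Pre_
    | some v =>
      let tempSum' := tempSum + v
      if tempSum' > totalSum then (false, 0) else canBuyGo bike_rent totalSum rest tempSum'

def canBuy (bike_rent : List Int) (mid : Int) (totalSum : Int) : Bool × Int :=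
  canBuyGo bike_rent totalSum (PySem.List.pyRange 0 mid 1) 0

def SolutionGoA (bike_rent : List Int) (prefixSum : List Int) (totalSum sharedBudget : Int)
    (l r : Int) (ans : Int × Int) : Int × Int :=
  if h : l ≤ r then
    let mid := PySem.Int.floordiv (l + r) 2
    -- prefixSum[mid]: Python raises IndexError out of range; unreachable under Pre_
    let res := canBuy bike_rent mid (totalSum - PySem.List.pyGetD prefixSum mid 0)
    if res.1 then
      SolutionGoA bike_rent prefixSum totalSum sharedBudget (mid + 1) r (mid, |sharedBudget - res.2|)
    else
      SolutionGoA bike_rent prefixSum totalSum sharedBudget l (mid - 1) ans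
  else ans
termination_by (r + 1 - l).toNat
decreasing_by
  · have := PySem.Int.floordiv_two_mid_bounds h
    omega
  · have := PySem.Int.floordiv_two_mid_bounds h
    omega

def Solution (boys_money : List Int) (bike_rent : List Int) (schoolBoys : Int) (bikes : Int) (sharedBudget : Int) : Int × Int :=
  let prefixSum := boys_money.foldl (fun acc bm => acc ++ [PySem.List.pyGetD acc (-1) 0 + bm]) [0]
  let totalSum := sharedBudget + boys_money.sum
  SolutionGoA bike_rent prefixSum totalSum sharedBudget 0 bikes (0, 0)

-- ===== PORT B =====
def SolutionAltGo (prefB prefR maxR : List Int) (total sharedBudget : Int)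
    (l r : Int) (ans : Int × Int) : Int × Int :=
  if h : l ≤ r then
    let mid := PySem.Int.floordiv (l + r) 2
    if mid = 0 ∨ PySem.List.pyGetD maxR mid 0 ≤ total - PySem.List.pyGetD prefB mid 0 then
      SolutionAltGo prefB prefR maxR total sharedBudget (mid + 1) r
        (mid, |sharedBudget - PySem.List.pyGetD prefR mid 0|)
    else
      SolutionAltGo prefB prefR maxR total sharedBudget l (mid - 1) ans
  else ans
termination_by (r + 1 - l).toNat
decreasing_by
  · have := PySem.Int.floordiv_two_mid_bounds h
    omega
  · have := PySem.Int.floordiv_two_mid_bounds h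
    omega

def Solution_alt (boys_money : List Int) (bike_rent : List Int) (schoolBoys : Int) (bikes : Int) (sharedBudget : Int) : Int × Int :=
  let stB := boys_money.foldl
    (fun (st : List Int × Int) x => let sB := st.2 + x; (st.1 ++ [sB], sB)) ([0], 0)
  let stR := bike_rent.foldl
    (fun (st : List Int × List Int × Int × Option Int) x =>
      let s := st.2.2.1 + x
      let m := match st.2.2.2 with
               | none => s
               | some mv => if mv ≥ s then mv else s
      (st.1 ++ [s], st.2.1 ++ [m], s, some m)) ([0], [0], 0, none)
  let total := sharedBudget + stB.2
  SolutionAltGo stB.1 stR.1 stR.2.1 total sharedBudget 0 bikes (0, 0)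

-- ===== PRECONDITION & SPEC =====
-- Pre_ excludes bikes larger than either list's length: there A's binary-search probes
-- index prefixSum/bike_rent out of range and usually raise IndexError (A returns a value
-- only when an early budget overflow happens to cut the canBuy scan short, an accident of
-- the scan order that B's precomputed tables cannot reproduce).
def Pre_Solution (boys_money : List Int) (bike_rent : List Int) (schoolBoys : Int) (bikes : Int) (sharedBudget : Int) : Prop :=
  bikes ≤ (boys_money.length : Int) ∧ bikes ≤ (bike_rent.length : Int)
instance (boys_money : List Int) (bike_rent : List Int) (schoolBoys : Int) (bikes : Int) (sharedBudget : Int) : Decidable (Pre_Solution boys_money bike_rent schoolBoys bikes sharedBudget) := by unfold Pre_Solution; infer_instance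

def pvWitness_Solution : List Int × List Int × Int × Int × Int := ([3, 1], [2, 2], 2, 2, 4)

def Spec_Solution (boys_money : List Int) (bike_rent : List Int) (schoolBoys : Int) (bikes : Int) (sharedBudget : Int) (out : Int × Int) : Prop := out = Solution_alt boys_money bike_rent schoolBoys bikes sharedBudget
instance (boys_money : List Int) (bike_rent : List Int) (schoolBoys : Int) (bikes : Int) (sharedBudget : Int) (out : Int × Int) : Decidable (Spec_Solution boys_money bike_rent schoolBoys bikes sharedBudget out) := by unfold Spec_Solution; infer_instance

-- ===== CLAIM (what is proved, stated in full; the proofs are below) =====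
def Claim_equal_Solution : Prop := ∀ (boys_money : List Int) (bike_rent : List Int) (schoolBoys : Int) (bikes : Int) (sharedBudget : Int), Dom_Solution boys_money bike_rent schoolBoys bikes sharedBudget → Pre_Solution boys_money bike_rent schoolBoys bikes sharedBudget → Spec_Solution boys_money bike_rent schoolBoys bikes sharedBudget (Solution boys_money bike_rent schoolBoys bikes sharedBudget)

-- ===== LEMMAS AND PROOFS =====

-- partial-sum list starting from accumulated sum s
def sumsFrom : List Int → Int → List Int
  | [], _ => []
  | x :: xs, s => (s + x) :: sumsFrom xs (s + x)

-- running maxima of the partial sums (m = best so far; none before the first element)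
def maxesFrom : List Int → Int → Option Int → List Int
  | [], _, _ => []
  | x :: xs, s, m =>
    let s' := s + x
    let m' := match m with
              | none => s'
              | some mv => if mv ≥ s' then mv else s'
    m' :: maxesFrom xs s' (some m')

-- canBuy's loop, restated structurally on the remaining suffix
def canFrom (T : Int) : List Int → Int → Nat → Bool × Int
  | _, t, 0 => (true, t)
  | [], t, _ + 1 => (true, t)      -- unreachable when k ≤ length
  | x :: xs, t, k + 1 =>
    let t' := t + x
    if t' > T then (false, 0) else canFrom T xs t' k

theorem canBuyGo_eq_canFrom (T : Int) :
    ∀ (k : Nat) (pre xs : List Int) (t : Int), k ≤ xs.length →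
      canBuyGo (pre ++ xs) T (PySem.List.pyRange (pre.length : Int) ((pre.length : Int) + k) 1) t
        = canFrom T xs t k := by
  intro k
  induction k with
  | zero =>
    intro pre xs t _
    rw [PySem.List.pyRange_one_eq_nil (by omega)]
    cases xs <;> rfl
  | succ k ih =>
    intro pre xs t hk
    cases xs with
    | nil => simp at hk
    | cons x rest =>
      rw [PySem.List.pyRange_one_cons (by omega)]
      show canBuyGo (pre ++ x :: rest) T (_ :: _) t = _
      simp only [canBuyGo, PySem.List.pyGet?_append_length]
      simp only [canFrom]
      by_cases hgt : t + x > T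
      · simp [hgt]
      · simp only [hgt, if_neg, if_false]
        have h2 : pre ++ x :: rest = (pre ++ [x]) ++ rest := by simp
        have h3 : ((pre.length : Int) + 1) = ((pre ++ [x]).length : Int) := by simp
        have h4 : ((pre.length : Int) + (k + 1 : Nat)) = ((pre ++ [x]).length : Int) + k := by
          push_cast; simp; ring
        rw [h2, h3, h4, ih (pre ++ [x]) rest (t + x) (by simpa using Nat.lt_succ_iff.mp (by simpa using hk))]

theorem canBuy_eq_canFrom (bike_rent : List Int) (T : Int) (k : Nat) (hk : k ≤ bike_rent.length) :
    canBuy bike_rent (k : Int) T = canFrom T bike_rent 0 k := by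
  have := canBuyGo_eq_canFrom T k [] bike_rent 0 hk
  simpa [canBuy] using this

theorem maxesFrom_ge (xs : List Int) :
    ∀ (s m : Int) (j : Nat) (d : Int), j < xs.length → m ≤ (maxesFrom xs s (some m)).getD j d := by
  induction xs with
  | nil => intro s m j d h; simp at h
  | cons x rest ih =>
    intro s m j d h
    cases j with
    | zero =>
      simp only [maxesFrom, List.getD_cons_zero]
      split <;> omega
    | succ j =>
      simp only [maxesFrom, List.getD_cons_succ]
      have hm' : m ≤ (if m ≥ s + x then m else s + x) := by split <;> omega
      exact le_trans hm' (ih _ _ j d (by simpa using h))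

-- after a prefix whose running maximum m is still within T, the early-exit scan agrees
-- with the precomputed tables
theorem canFrom_zero (T t : Int) (xs : List Int) : canFrom T xs t 0 = (true, t) := by
  cases xs <;> rfl

-- after a prefix whose running maximum m is still within T, the early-exit scan agrees
-- with the precomputed tables
theorem canFrom_table_some (xs : List Int) :
    ∀ (T s m : Int) (k : Nat), 1 ≤ k → k ≤ xs.length → m ≤ T →
      canFrom T xs s k
        = if (maxesFrom xs s (some m)).getD (k - 1) 0 ≤ T
          then (true, (sumsFrom xs s).getD (k - 1) 0) else (false, 0) := by
  induction xs with
  | nil => intro T s m k h1 h2 _; simp at h2; omega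
  | cons x rest ih =>
    intro T s m k h1 h2 hm
    obtain ⟨k', rfl⟩ : ∃ k', k = k' + 1 := ⟨k - 1, by omega⟩
    have hlen : k' ≤ rest.length := by simp at h2; omega
    set m' : Int := if m ≥ s + x then m else s + x with hm'def
    have hmm : m ≤ m' ∧ s + x ≤ m' ∧ (m' = m ∨ m' = s + x) := by
      rw [hm'def]; split <;> omega
    have hunf : canFrom T (x :: rest) s (k' + 1)
        = if s + x > T then (false, 0) else canFrom T rest (s + x) k' := rfl
    have hmx : maxesFrom (x :: rest) s (some m) = m' :: maxesFrom rest (s + x) (some m') := rfl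
    have hsm : sumsFrom (x :: rest) s = (s + x) :: sumsFrom rest (s + x) := rfl
    rw [hunf, hmx, hsm]
    simp only [Nat.add_sub_cancel]
    cases k' with
    | zero =>
      rw [List.getD_cons_zero, List.getD_cons_zero, canFrom_zero]
      by_cases hgt : s + x > T
      · rw [if_pos hgt, if_neg (by omega)]
      · rw [if_neg hgt, if_pos (by simp at hgt; omega)]
    | succ j =>
      rw [List.getD_cons_succ, List.getD_cons_succ]
      by_cases hgt : s + x > T
      · have hge := maxesFrom_ge rest (s + x) m' j 0 (by omega)
        rw [if_pos hgt, if_neg (by omega)]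
      · rw [if_neg hgt]
        have hm'T : m' ≤ T := by simp at hgt; omega
        have := ih T (s + x) m' (j + 1) (by omega) (by omega) hm'T
        simpa using this

theorem canFrom_table_none (xs : List Int) (T : Int) (k : Nat) (h1 : 1 ≤ k) (h2 : k ≤ xs.length) :
    canFrom T xs 0 k
      = if (maxesFrom xs 0 none).getD (k - 1) 0 ≤ T
        then (true, (sumsFrom xs 0).getD (k - 1) 0) else (false, 0) := by
  cases xs with
  | nil => simp at h2; omega
  | cons x rest =>
    obtain ⟨k', rfl⟩ : ∃ k', k = k' + 1 := ⟨k - 1, by omega⟩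
    have hlen : k' ≤ rest.length := by simp at h2; omega
    have hunf : canFrom T (x :: rest) 0 (k' + 1)
        = if 0 + x > T then (false, 0) else canFrom T rest (0 + x) k' := rfl
    have hmx : maxesFrom (x :: rest) 0 none = (0 + x) :: maxesFrom rest (0 + x) (some (0 + x)) := rfl
    have hsm : sumsFrom (x :: rest) 0 = (0 + x) :: sumsFrom rest (0 + x) := rfl
    rw [hunf, hmx, hsm]
    simp only [Nat.add_sub_cancel]
    cases k' with
    | zero =>
      rw [List.getD_cons_zero, List.getD_cons_zero, canFrom_zero]
      by_cases hgt : 0 + x > T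
      · rw [if_pos hgt, if_neg (by omega)]
      · rw [if_neg hgt, if_pos (by simp at hgt ⊢; omega)]
    | succ j =>
      rw [List.getD_cons_succ, List.getD_cons_succ]
      by_cases hgt : 0 + x > T
      · have hge := maxesFrom_ge rest (0 + x) (0 + x) j 0 (by omega)
        rw [if_pos hgt, if_neg (by omega)]
      · rw [if_neg hgt]
        have := canFrom_table_some rest T (0 + x) (0 + x) (j + 1) (by omega) (by omega)
          (by simp at hgt; omega)
        simpa using this

-- A's prefixSum fold builds [0] ++ the partial sums
theorem foldA_pref (xs : List Int) :
    ∀ (pr : List Int) (v : Int),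
      xs.foldl (fun acc bm => acc ++ [PySem.List.pyGetD acc (-1) 0 + bm]) (pr ++ [v])
        = (pr ++ [v]) ++ sumsFrom xs v := by
  induction xs with
  | nil => intro pr v; simp [sumsFrom]
  | cons x rest ih =>
    intro pr v
    simp only [List.foldl_cons, PySem.List.pyGetD_neg_one_append_singleton, sumsFrom]
    have := ih (pr ++ [v]) (v + x)
    simp only [List.append_assoc] at this ⊢
    simpa using this

-- B's boys_money fold builds the same list and the total sum
theorem foldB_pref (xs : List Int) :
    ∀ (pr : List Int) (s : Int),
      xs.foldl (fun (st : List Int × Int) x => let sB := st.2 + x; (st.1 ++ [sB], sB)) (pr, s)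
        = (pr ++ sumsFrom xs s, s + xs.sum) := by
  induction xs with
  | nil => intro pr s; simp [sumsFrom]
  | cons x rest ih =>
    intro pr s
    simp only [List.foldl_cons, sumsFrom]
    rw [ih]
    simp only [List.append_assoc, List.singleton_append, List.sum_cons, Prod.mk.injEq]
    exact ⟨trivial, by ring⟩

-- B's bike_rent fold builds [0] ++ partial sums and [0] ++ running maxima
theorem foldR_pref (xs : List Int) :
    ∀ (pr mx : List Int) (s : Int) (m : Option Int),
      (xs.foldl (fun (st : List Int × List Int × Int × Option Int) x =>
          let s' := st.2.2.1 + x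
          let m' := match st.2.2.2 with
                    | none => s'
                    | some mv => if mv ≥ s' then mv else s'
          (st.1 ++ [s'], st.2.1 ++ [m'], s', some m')) (pr, mx, s, m)).1
        = pr ++ sumsFrom xs s
      ∧ (xs.foldl (fun (st : List Int × List Int × Int × Option Int) x =>
          let s' := st.2.2.1 + x
          let m' := match st.2.2.2 with
                    | none => s'
                    | some mv => if mv ≥ s' then mv else s'
          (st.1 ++ [s'], st.2.1 ++ [m'], s', some m')) (pr, mx, s, m)).2.1
        = mx ++ maxesFrom xs s m := by
  induction xs with
  | nil => intro pr mx s m; simp [sumsFrom, maxesFrom]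
  | cons x rest ih =>
    intro pr mx s m
    simp only [List.foldl_cons, sumsFrom, maxesFrom]
    have := ih (pr ++ [s + x])
      (mx ++ [match m with | none => s + x | some mv => if mv ≥ s + x then mv else s + x])
      (s + x)
      (some (match m with | none => s + x | some mv => if mv ≥ s + x then mv else s + x))
    simpa [List.append_assoc] using this

-- lockstep equality of the two binary searches
theorem go_eq (bike_rent : List Int) (P : List Int) (total sh : Int) :
    ∀ (fuel : Nat) (l r : Int) (ans : Int × Int), (r + 1 - l).toNat ≤ fuel → 0 ≤ l →
      r ≤ (bike_rent.length : Int) →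
      SolutionGoA bike_rent P total sh l r ans
        = SolutionAltGo P (0 :: sumsFrom bike_rent 0) (0 :: maxesFrom bike_rent 0 none)
            total sh l r ans := by
  intro fuel
  induction fuel with
  | zero =>
    intro l r ans hf hl hr
    rw [SolutionGoA, SolutionAltGo]
    have : ¬ l ≤ r := by omega
    simp [this]
  | succ fuel ih =>
    intro l r ans hf hl hr
    rw [SolutionGoA, SolutionAltGo]
    by_cases hlr : l ≤ r
    · simp only [hlr, dif_pos]
      have hmid := PySem.Int.floordiv_two_mid_bounds hlr
      set mid := PySem.Int.floordiv (l + r) 2 with hmiddef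
      have hmid0 : 0 ≤ mid := by omega
      have hmidn : mid ≤ (bike_rent.length : Int) := by omega
      obtain ⟨k, hkeq⟩ : ∃ k : Nat, mid = (k : Int) := ⟨mid.toNat, by omega⟩
      have hkn : k ≤ bike_rent.length := by omega
      set T := total - PySem.List.pyGetD P mid 0 with hTdef
      have hcb : canBuy bike_rent mid T = canFrom T bike_rent 0 k := by
        rw [hkeq]; exact canBuy_eq_canFrom bike_rent T k hkn
      cases k with
      | zero =>
        have hmz : mid = (0 : Int) := by omega
        have hcb0 : canBuy bike_rent (0 : Int) T = (true, 0) := by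
          have h := canBuy_eq_canFrom bike_rent T 0 (by omega)
          norm_num at h
          rw [h, canFrom_zero]
        simp only [hmz, hcb0, PySem.List.pyGetD_zero_cons, sub_zero, true_or, if_true,
          eq_self_iff_true]
        exact ih _ r _ (by omega) (by omega) hr
      | succ k' =>
        have hk1 : (1 : Nat) ≤ k' + 1 := by omega
        have hlookM : PySem.List.pyGetD (0 :: maxesFrom bike_rent 0 none) mid 0
            = (maxesFrom bike_rent 0 none).getD k' 0 := by
          rw [hkeq, PySem.List.pyGetD_natCast]; simp
        have hlookS : PySem.List.pyGetD (0 :: sumsFrom bike_rent 0) mid 0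
            = (sumsFrom bike_rent 0).getD k' 0 := by
          rw [hkeq, PySem.List.pyGetD_natCast]; simp
        have hmz : ¬ (mid = 0) := by omega
        rw [hcb, canFrom_table_none bike_rent T (k' + 1) hk1 hkn]
        simp only [Nat.add_sub_cancel]
        by_cases hc : (maxesFrom bike_rent 0 none).getD k' 0 ≤ T
        · simp only [hc, if_pos, if_true]
          rw [if_pos (by right; rw [hlookM]; exact hc)]
          rw [hlookS]
          exact ih (mid + 1) r _ (by omega) (by omega) hr
        · simp only [hc, if_false, Bool.false_eq_true]
          rw [if_neg (by rw [hlookM]; tauto)]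
          exact ih l (mid - 1) ans (by omega) hl (by omega)
    · simp [hlr]

-- ===== VERDICT (by name: the statement is the Claim_ definition above) =====
theorem Solution_spec : Claim_equal_Solution := by
  intro boys_money bike_rent schoolBoys bikes sharedBudget _ hpre
  unfold Spec_Solution Solution Solution_alt
  obtain ⟨hb1, hb2⟩ := hpre
  have hA : boys_money.foldl (fun acc bm => acc ++ [PySem.List.pyGetD acc (-1) 0 + bm]) [0]
      = [0] ++ sumsFrom boys_money 0 := by
    have := foldA_pref boys_money [] 0
    simpa using this
  have hB := foldB_pref boys_money [0] 0
  have hR := foldR_pref bike_rent [0] [0] 0 none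
  simp only [hA, hB, hR.1, hR.2]
  simp only [List.singleton_append, zero_add]
  exact go_eq bike_rent (0 :: sumsFrom boys_money 0) (sharedBudget + boys_money.sum)
    sharedBudget ((bikes + 1 - 0).toNat) 0 bikes (0, 0) (by omega) (by omega) hb2
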